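-- pv_equiv track=rewrite | github.com/sthagen/mandiant-flare-floss | floss/language/go/extract.py | find_longest_range
-- ===== SOURCE A (Python) =====
-- def find_longest_range(sub_ranges):
--     """
--     Find the longest range in a list of ranges.
--     Example:
--     [(3, 6), (188, 204), (10, 12), (40, 200), (7, 9), (1, 2), (4, 8), (13, 16), (90, 100)] -> [(1, 16), (40, 204)]
--     """
--     ranges = sorted(sub_ranges)
--     longest_range = [ranges[0]]
--
--     for i in range(1, len(ranges)):
--         current_range = ranges[i]
--         prev_range = longest_range[-1]
--
--         if current_range[0] <= prev_range[1] + 1: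
--             longest_range[-1] = (prev_range[0], max(prev_range[1], current_range[1]))
--         else:
--             longest_range.append(current_range)
--
--     longest_range = sorted(longest_range, key=lambda x: x[1] - x[0], reverse=True)
--
--     return longest_range[0]
-- ===== SOURCE B (Python) =====
-- def find_longest_range(sub_ranges):
--     """
--     Find the longest range in a list of ranges.
--
--     Builds the disjoint merged-component list back-to-front: scanning the
--     sorted ranges in reverse, each range is prepended after coalescing every
--     leading component it now touches; then one pass picks the best component.
--     """
--     comps = []  # disjoint merged components, ascending; built back-to-front
--     for s, e in reversed(sorted(sub_ranges)):
--         while comps and comps[0][0] <= e + 1: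
--             e2 = comps.pop(0)[1]
--             if e2 > e:
--                 e = e2
--         comps.insert(0, (s, e))
--     best = comps[0]
--     for c in comps[1:]:
--         if c[1] - c[0] > best[1] - best[0]:
--             best = c
--     return best
-- ===== Notes on version B (the rewrite author's own statement) =====
-- stated objective: alternative
-- what changed: A scans the sorted ranges forward, always merging into the last component, and then sorts the component list a second time by length; B builds the disjoint component list back-to-front (reverse scan), each range coalescing arbitrarily many leading components in a cascade, and selects the best component in one pass instead of re-sorting.
import Mathlib
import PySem

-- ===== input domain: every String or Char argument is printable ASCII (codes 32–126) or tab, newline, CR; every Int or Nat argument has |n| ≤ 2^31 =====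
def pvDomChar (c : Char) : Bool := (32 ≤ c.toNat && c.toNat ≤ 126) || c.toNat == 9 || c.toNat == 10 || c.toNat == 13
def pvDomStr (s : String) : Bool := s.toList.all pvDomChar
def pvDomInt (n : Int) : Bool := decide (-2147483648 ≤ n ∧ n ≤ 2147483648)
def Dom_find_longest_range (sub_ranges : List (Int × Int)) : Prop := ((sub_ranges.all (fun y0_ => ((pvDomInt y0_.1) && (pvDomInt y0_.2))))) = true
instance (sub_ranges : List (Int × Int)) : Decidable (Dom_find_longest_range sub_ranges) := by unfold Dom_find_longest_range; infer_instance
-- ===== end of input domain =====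

-- B builds the disjoint merged-component list back-to-front (reverse scan with a coalescing
-- cascade) and picks the best component in one pass instead of A's second length sort;
-- return values only (no mutation).

-- ===== PORT A =====
-- loop body; longest_range is kept in REVERSE order (head = longest_range[-1])
def pvAstep (acc : List (Int × Int)) (current_range : Int × Int) : List (Int × Int) :=
  match acc with
  | [] => [current_range]   -- unreachable: longest_range is never empty
  | prev_range :: tl =>
      if current_range.1 ≤ prev_range.2 + 1 then
        (prev_range.1, max prev_range.2 current_range.2) :: tl
      else
        current_range :: prev_range :: tl

def find_longest_range (sub_ranges : List (Int × Int)) : Int × Int :=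
  let ranges := PySem.List.sorted2 sub_ranges (fun p => p.1) (fun p => p.2)
  match ranges with
  | [] => (0, 0)   -- ranges[0] raises IndexError in Python; excluded by Pre_
  | r0 :: rest =>
      let longest_rev := rest.foldl pvAstep [r0]
      let longest := PySem.List.sorted longest_rev.reverse (fun x => x.2 - x.1) true
      match longest with
      | [] => (0, 0)   -- unreachable: longest_range is nonempty
      | y :: _ => y

-- ===== PORT B =====
-- the while-cascade + insert(0, (s, e)) of one iteration of B's reversed scan
def pvRStep (s e : Int) : List (Int × Int) → List (Int × Int)
  | [] => [(s, e)]
  | c :: cs =>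
      if c.1 ≤ e + 1 then pvRStep s (if c.2 > e then c.2 else e) cs
      else (s, e) :: c :: cs

def find_longest_range_alt (sub_ranges : List (Int × Int)) : Int × Int :=
  let comps := ((PySem.List.sorted2 sub_ranges (fun p => p.1) (fun p => p.2)).reverse).foldl
      (fun acc x => pvRStep x.1 x.2 acc) []
  match comps with
  | [] => (0, 0)   -- comps[0] raises IndexError in Python; excluded by Pre_
  | b0 :: rest =>
      rest.foldl (fun best c => if c.2 - c.1 > best.2 - best.1 then c else best) b0

-- ===== PRECONDITION & SPEC =====
-- Pre_ excludes only the empty list, on which A raises IndexError (ranges[0]).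
def Pre_find_longest_range (sub_ranges : List (Int × Int)) : Prop := sub_ranges ≠ []
instance (sub_ranges : List (Int × Int)) : Decidable (Pre_find_longest_range sub_ranges) := by unfold Pre_find_longest_range; infer_instance

def pvWitness_find_longest_range : (List (Int × Int)) := [(3, 6), (1, 2), (10, 12)]

def Spec_find_longest_range (sub_ranges : List (Int × Int)) (out : Int × Int) : Prop := out = find_longest_range_alt sub_ranges
instance (sub_ranges : List (Int × Int)) (out : Int × Int) : Decidable (Spec_find_longest_range sub_ranges out) := by unfold Spec_find_longest_range; infer_instance

-- ===== CLAIM (what is proved, stated in full; the proofs are below) =====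
def Claim_equal_find_longest_range : Prop := ∀ (sub_ranges : List (Int × Int)), Dom_find_longest_range sub_ranges → Pre_find_longest_range sub_ranges → Spec_find_longest_range sub_ranges (find_longest_range sub_ranges)

-- ===== LEMMAS AND PROOFS =====

-- "better" update: replace b by x only on strictly greater length
def pvUpd (b x : Int × Int) : Int × Int := if x.2 - x.1 > b.2 - b.1 then x else b

-- forward formulation of A's merge loop
def pvMerge (c : Int × Int) : List (Int × Int) → List (Int × Int)
  | [] => [c]
  | r :: rest =>
      if r.1 ≤ c.2 + 1 then pvMerge (c.1, max c.2 r.2) rest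
      else c :: pvMerge (r.1, r.2) rest

-- component list of a list: merge scan started at its head
def pvMergeList : List (Int × Int) → List (Int × Int)
  | [] => []
  | c :: rest => pvMerge c rest

-- A's reversed-accumulator loop computes pvMerge
theorem pvA_loop (rest : List (Int × Int)) : ∀ (c : Int × Int) (acc : List (Int × Int)),
    (rest.foldl pvAstep (c :: acc)).reverse = acc.reverse ++ pvMerge c rest := by
  induction rest with
  | nil => intro c acc; simp [pvMerge]
  | cons r rest ih =>
      intro c acc
      simp only [List.foldl_cons, pvAstep, pvMerge]
      split
      · rw [ih]
      · rw [ih]; simp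

-- the if inside pvRStep's cascade is a max
theorem pvIfMax (e a : Int) : (if a > e then a else e) = max e a := by
  split <;> omega

-- pvRStep always returns its own start in head position
theorem pvRStep_head (M : List (Int × Int)) : ∀ (s e : Int),
    ∃ E T, pvRStep s e M = (s, E) :: T := by
  induction M with
  | nil => intro s e; exact ⟨e, [], rfl⟩
  | cons c cs ih =>
      intro s e
      simp only [pvRStep]
      split
      · exact ih s _
      · exact ⟨e, c :: cs, rfl⟩

-- composing two cascades: the inner start merges into the outer one
theorem pvRStep_comp (M : List (Int × Int)) : ∀ (a b c1 c2 : Int), c1 ≤ b + 1 →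
    pvRStep a b (pvRStep c1 c2 M) = pvRStep a (max b c2) M := by
  induction M with
  | nil =>
      intro a b c1 c2 h
      simp only [pvRStep, if_pos h, pvIfMax]
  | cons m M' ih =>
      intro a b c1 c2 h
      by_cases hm : m.1 ≤ c2 + 1
      · simp only [pvRStep, if_pos hm, pvIfMax]
        rw [if_pos (show m.1 ≤ max b c2 + 1 by omega), ih a b c1 (max c2 m.2) h]
        congr 1
        omega
      · conv_lhs => rw [pvRStep, if_neg hm]
        rw [show pvRStep a b ((c1, c2) :: m :: M')
              = pvRStep a (max b c2) (m :: M') by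
            simp only [pvRStep, if_pos h, pvIfMax]]

-- the forward merge scan equals the backward cascade over the component list
theorem pvMerge_eq_RStep (s : List (Int × Int)) : ∀ (c : Int × Int),
    pvMerge c s = pvRStep c.1 c.2 (pvMergeList s) := by
  induction s with
  | nil => intro c; simp [pvMerge, pvMergeList, pvRStep]
  | cons r s' ih =>
      intro c
      simp only [pvMerge, pvMergeList]
      by_cases h : r.1 ≤ c.2 + 1
      · rw [if_pos h, ih (c.1, max c.2 r.2), ih r, pvRStep_comp _ _ _ _ _ h]
      · rw [if_neg h, ih r]
        obtain ⟨E, T, hET⟩ := pvRStep_head (pvMergeList s') r.1 r.2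
        rw [hET]
        simp only [pvRStep]
        rw [if_neg (by omega : ¬ r.1 ≤ c.2 + 1)]

-- B's whole reversed fold computes the component list of the sorted input
theorem pvB_fold (s : List (Int × Int)) :
    (s.reverse).foldl (fun acc x => pvRStep x.1 x.2 acc) [] = pvMergeList s := by
  rw [List.foldl_reverse]
  induction s with
  | nil => rfl
  | cons c s' ih =>
      simp only [List.foldr_cons, ih]
      exact (pvMerge_eq_RStep s' c).symm

-- head of insertBy
theorem pv_head_insertBy (before : Int × Int → Int × Int → Bool) (x h : Int × Int)
    (ys : List (Int × Int)) (hh : ys.head? = some h) :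
    (PySem.List.insertBy before x ys).head? = some (if before x h then x else h) := by
  cases ys with
  | nil => simp at hh
  | cons y t =>
      simp at hh
      subst hh
      simp only [PySem.List.insertBy]
      split <;> simp_all

-- head of the sorted-fold: the running "first strict max"
theorem pv_head_foldl_insertBy (before : Int × Int → Int × Int → Bool)
    (l : List (Int × Int)) : ∀ (acc : List (Int × Int)) (h : Int × Int),
    acc.head? = some h →
    (l.foldl (fun acc x => PySem.List.insertBy before x acc) acc).head?
      = some (l.foldl (fun b x => if before x b then x else b) h) := by
  induction l with
  | nil => intro acc h hh; simpa using hh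
  | cons x t ih =>
      intro acc h hh
      simp only [List.foldl_cons]
      exact ih _ _ (pv_head_insertBy before x h acc hh)

-- head of the reverse length-sort = foldl pvUpd over the tail
theorem pv_head_sorted (m0 : Int × Int) (mt : List (Int × Int)) :
    (PySem.List.sorted (m0 :: mt) (fun x => x.2 - x.1) true).head?
      = some (mt.foldl pvUpd m0) := by
  rw [PySem.List.sorted_rev_eq_foldl_insertBy]
  simp only [List.foldl_cons]
  have h1 : (PySem.List.insertBy (fun a b => decide ((b.2 - b.1 : Int) < a.2 - a.1)) m0 []).head? = some m0 := by
    simp [PySem.List.insertBy]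
  rw [pv_head_foldl_insertBy _ mt _ m0 h1]
  have hf : (fun (b x : Int × Int) => if decide (b.2 - b.1 < x.2 - x.1) = true then x else b) = pvUpd := by
    funext b x
    simp [pvUpd]
  rw [hf]

-- ===== VERDICT (by name: the statement is the Claim_ definition above) =====
theorem find_longest_range_spec : Claim_equal_find_longest_range := by
  intro sub_ranges _ hpre
  unfold Spec_find_longest_range
  simp only [find_longest_range, find_longest_range_alt]
  rw [pvB_fold]
  cases hs : PySem.List.sorted2 sub_ranges (fun p => p.1) (fun p => p.2) with
  | nil => rfl
  | cons c0 rest =>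
      show (match PySem.List.sorted ((rest.foldl pvAstep [c0]).reverse) (fun x => x.2 - x.1) true with
            | [] => ((0 : Int), (0 : Int))
            | y :: _ => y)
         = (match pvMergeList (c0 :: rest) with
            | [] => ((0 : Int), (0 : Int))
            | b0 :: r => r.foldl (fun best c => if c.2 - c.1 > best.2 - best.1 then c else best) b0)
      have hloop := pvA_loop rest c0 []
      simp only [List.reverse_nil, List.nil_append] at hloop
      obtain ⟨E, T, hET⟩ := pvRStep_head (pvMergeList rest) c0.1 c0.2
      have hm : pvMergeList (c0 :: rest) = (c0.1, E) :: T := by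
        rw [show pvMergeList (c0 :: rest) = pvMerge c0 rest from rfl, pvMerge_eq_RStep]
        exact hET
      have hhead : (PySem.List.sorted ((rest.foldl pvAstep [c0]).reverse) (fun x => x.2 - x.1) true).head?
          = some (T.foldl pvUpd (c0.1, E)) := by
        rw [hloop]
        have : pvMerge c0 rest = (c0.1, E) :: T := by simpa [pvMergeList] using hm
        rw [this]
        exact pv_head_sorted _ _
      rw [hm]
      cases hsorted : PySem.List.sorted ((rest.foldl pvAstep [c0]).reverse) (fun x => x.2 - x.1) true with
      | nil => exact absurd (hsorted ▸ hhead) (by simp)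
      | cons y ys =>
          rw [hsorted] at hhead
          simp only [List.head?_cons, Option.some.injEq] at hhead
          show y = T.foldl pvUpd (c0.1, E)
          exact hhead
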